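-- pv_equiv track=rewrite | github.com/timdean27/3-Leet-A-Day | Interview_Questions/GreenLight/Plinko/Single_file_Plinko.py | make_points_row
-- ===== SOURCE A (Python) =====
-- def make_points_row(columns):
--     points_row = [0] * columns  # Initialize with zeros
--     mid1 = (columns - 1) // 2  # Left of the center
--     mid2 = columns // 2        # Right of the center
--
--     # Populate points symmetrically around the two central indices
--     for i in range(mid1 + 1):
--         if mid1 - i >= 0:
--             points_row[mid1 - i] += i + 1  # Increment left side
--         if mid2 + i < columns:
--             points_row[mid2 + i] += i + 1  # Increment right side
--
--     return points_row  # Return the constructed points row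
-- ===== SOURCE B (Python) =====
-- def make_points_row(columns):
--     mid1 = (columns - 1) // 2  # Left of the center
--     mid2 = columns // 2        # Right of the center
--     # Read each position's value directly in closed form instead of
--     # scattering two increments per distance from the center.
--     row = []
--     for p in range(columns):
--         v = 0
--         if p <= mid1:
--             v += mid1 - p + 1
--         if p >= mid2:
--             v += p - mid2 + 1
--         row.append(v)
--     return row
-- ===== Notes on version B (the rewrite author's own statement) =====
-- stated objective: alternative
-- what changed: B computes each position's value directly by the closed-form V-shape formula (gather per output position) instead of A's scatter loop that walks distances from the center and increments two cells per step.
import Mathlib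
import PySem

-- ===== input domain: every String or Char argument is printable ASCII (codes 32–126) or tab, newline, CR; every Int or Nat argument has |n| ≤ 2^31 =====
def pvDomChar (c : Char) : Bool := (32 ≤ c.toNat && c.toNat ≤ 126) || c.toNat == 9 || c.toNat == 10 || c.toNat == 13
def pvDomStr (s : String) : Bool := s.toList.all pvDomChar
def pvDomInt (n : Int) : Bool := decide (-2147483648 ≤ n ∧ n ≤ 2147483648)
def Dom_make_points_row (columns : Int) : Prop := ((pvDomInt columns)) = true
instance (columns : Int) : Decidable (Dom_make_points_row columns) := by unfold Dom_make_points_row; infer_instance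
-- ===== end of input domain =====

-- B reads each position's value with the closed-form V-shape formula (gather) instead of A's scatter of two increments per distance from the center; alternative decomposition, same cost.


-- ===== PORT A =====
-- points_row[j] += v  (index already guarded in range by A's own ifs)
def pvAddAt (l : List Int) (j : Nat) (v : Int) : List Int := l.set j (l.getD j 0 + v)

def make_points_row (columns : Int) : List Int :=
  let mid1 := PySem.Int.floordiv (columns - 1) 2
  let mid2 := PySem.Int.floordiv columns 2
  (PySem.List.pyRange 0 (mid1 + 1) 1).foldl
    (fun l i =>
      let l := if mid1 - i ≥ 0 then pvAddAt l (mid1 - i).toNat (i + 1) else l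
      if mid2 + i < columns then pvAddAt l (mid2 + i).toNat (i + 1) else l)
    (List.replicate columns.toNat 0)

-- ===== PORT B =====
def make_points_row_alt (columns : Int) : List Int :=
  let mid1 := PySem.Int.floordiv (columns - 1) 2
  let mid2 := PySem.Int.floordiv columns 2
  (PySem.List.pyRange 0 columns 1).map (fun p =>
    (if p ≤ mid1 then mid1 - p + 1 else 0) + (if p ≥ mid2 then p - mid2 + 1 else 0))

-- ===== PRECONDITION & SPEC =====
def Spec_make_points_row (columns : Int) (out : List Int) : Prop := out = make_points_row_alt columns
instance (columns : Int) (out : List Int) : Decidable (Spec_make_points_row columns out) := by unfold Spec_make_points_row; infer_instance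

-- ===== CLAIM (what is proved, stated in full; the proofs are below) =====
def Claim_equal_make_points_row : Prop := ∀ (columns : Int), Dom_make_points_row columns → Spec_make_points_row columns (make_points_row columns)

-- ===== LEMMAS AND PROOFS =====

-- pvAddAt on a mapped range is a pointwise update
theorem pvAddAt_map_range (n j : Nat) (f : Nat → Int) (v : Int) (hj : j < n) :
    pvAddAt ((List.range n).map f) j v
      = (List.range n).map (fun p => if p = j then f p + v else f p) := by
  unfold pvAddAt
  apply List.ext_getElem
  · simp
  · intro k h1 h2
    simp only [List.length_set, List.length_map, List.length_range] at h1
    rw [List.getElem_set]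
    simp only [List.getElem_map, List.getElem_range,
      List.getD_eq_getElem?_getD, List.getElem?_map, List.getElem?_range, hj]
    split_ifs with h h' h'
    · simp [h]
    · omega
    · omega
    · rfl

-- the generic loop invariant for A's scatter loop
theorem pv_loop_inv (c m1 m2 : Int) (hc : 1 ≤ c) (_h0 : 0 ≤ m1)
    (hsum : m1 + m2 = c - 1) (hle : m1 ≤ m2) :
    ∀ (k : Nat), (k : Int) ≤ m1 + 1 →
    (PySem.List.pyRange 0 (k : Int) 1).foldl
      (fun l i =>
        let l := if m1 - i ≥ 0 then pvAddAt l (m1 - i).toNat (i + 1) else l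
        if m2 + i < c then pvAddAt l (m2 + i).toNat (i + 1) else l)
      (List.replicate c.toNat 0)
    = (List.range c.toNat).map (fun (p : Nat) =>
        (if m1 - (k : Int) < (p : Int) ∧ (p : Int) ≤ m1 then m1 - (p : Int) + 1 else 0)
        + (if m2 ≤ (p : Int) ∧ (p : Int) < m2 + (k : Int) then (p : Int) - m2 + 1 else 0)) := by
  intro k
  induction k with
  | zero =>
    intro _
    rw [show ((0 : Nat) : Int) = 0 from rfl, PySem.List.pyRange_one_eq_nil (le_refl 0)]
    simp only [List.foldl_nil]
    apply List.ext_getElem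
    · simp
    · intro i h1 h2
      simp only [List.getElem_replicate, List.getElem_map, List.getElem_range]
      have : ¬ (m1 - (0:Int) < (i:Int) ∧ (i:Int) ≤ m1) := by omega
      rw [if_neg this, if_neg (by omega)]
      norm_num
  | succ k ih =>
    intro hk
    have hk' : (k : Int) ≤ m1 + 1 := by push_cast at hk ⊢; omega
    have hkm1 : (k : Int) ≤ m1 := by push_cast at hk; omega
    rw [show ((k + 1 : Nat) : Int) = (k : Int) + 1 by push_cast; ring,
      PySem.List.pyRange_one_succ_right (by positivity),
      List.foldl_append, ih hk']
    simp only [List.foldl_cons, List.foldl_nil]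
    have hg1 : m1 - (k : Int) ≥ 0 := by omega
    have hg2 : m2 + (k : Int) < c := by omega
    rw [if_pos hg1, if_pos hg2]
    have hn1 : (m1 - (k : Int)).toNat < c.toNat := by omega
    have hn2 : (m2 + (k : Int)).toNat < c.toNat := by omega
    rw [pvAddAt_map_range _ _ _ _ hn1, pvAddAt_map_range _ _ _ _ hn2]
    apply List.map_congr_left
    intro p hp
    have hp' : p < c.toNat := List.mem_range.mp hp
    have e1 : p = (m1 - (k : Int)).toNat ↔ (p : Int) = m1 - (k : Int) := by omega
    have e2 : p = (m2 + (k : Int)).toNat ↔ (p : Int) = m2 + (k : Int) := by omega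
    split_ifs <;> omega

-- relations between the two midpoints, from floor division by 2
theorem pv_mid_facts (c : Int) :
    2 * PySem.Int.floordiv (c - 1) 2 + 1 ≥ c - 1 ∧
    2 * PySem.Int.floordiv (c - 1) 2 ≤ c - 1 ∧
    2 * PySem.Int.floordiv c 2 ≤ c ∧ 2 * PySem.Int.floordiv c 2 + 1 ≥ c := by
  have h1 := PySem.Int.floordiv_mul_add_mod (c - 1) 2
  have h2 := PySem.Int.floordiv_mul_add_mod c 2
  have h3 := PySem.Int.mod_two_eq (c - 1)
  have h4 := PySem.Int.mod_two_eq c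
  rcases h3 with h3 | h3 <;> rcases h4 with h4 | h4 <;> omega

-- ===== VERDICT (by name: the statement is the Claim_ definition above) =====
theorem make_points_row_spec : Claim_equal_make_points_row := by
  intro c _
  unfold Spec_make_points_row make_points_row make_points_row_alt
  simp only []
  set m1 := PySem.Int.floordiv (c - 1) 2 with hm1
  set m2 := PySem.Int.floordiv c 2 with hm2
  obtain ⟨f1, f2, f3, f4⟩ := pv_mid_facts c
  by_cases hc : 1 ≤ c
  · have h0 : 0 ≤ m1 := by omega
    have hsum : m1 + m2 = c - 1 := by omega
    have hle : m1 ≤ m2 := by omega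
    have hfin : ((m1 + 1).toNat : Int) = m1 + 1 := by omega
    have := pv_loop_inv c m1 m2 hc h0 hsum hle (m1 + 1).toNat (by omega)
    rw [hfin] at this
    rw [this, PySem.List.pyRange_one 0 c, show (c - 0).toNat = c.toNat by omega]
    rw [List.map_map]
    apply List.map_congr_left
    intro p hp
    have hp' : p < c.toNat := List.mem_range.mp hp
    simp only [Function.comp, zero_add]
    have hpc : (p : Int) < c := by omega
    split_ifs <;> omega
  · have hA : PySem.List.pyRange 0 (m1 + 1) 1 = [] := by
      apply PySem.List.pyRange_one_eq_nil; omega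
    have hB : PySem.List.pyRange 0 c 1 = [] := by
      apply PySem.List.pyRange_one_eq_nil; omega
    have hr : c.toNat = 0 := by omega
    rw [hA, hB, hr]
    simp
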